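-- pv_equiv track=rewrite | github.com/huikinglam02gmail/Leetcode_solutions | 3561.resulting-string-after-adjacent-removals.py | resultingString
-- ===== SOURCE A (Python) =====
-- def resultingString(s: str) -> str:
--     stack = []
--     for c in s:
--         if stack and (abs((ord(c) - ord(stack[-1]))) == 1 or abs((ord(c) - ord(stack[-1]))) == 25):
--             stack.pop()
--         else:
--             stack.append(c)
--     return ''.join(stack)
-- ===== SOURCE B (Python) =====
-- def resultingString(s: str) -> str:
--     # Repeatedly delete the LEFTMOST adjacent pair of alphabet-consecutive
--     # characters (difference 1 or 25 in code points) and rescan from the start.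
--     while True:
--         removed = False
--         for i in range(len(s) - 1):
--             d = abs(ord(s[i]) - ord(s[i + 1]))
--             if d == 1 or d == 25:
--                 s = s[:i] + s[i + 2:]
--                 removed = True
--                 break
--         if not removed:
--             return s
-- ===== Notes on version B (the rewrite author's own statement) =====
-- stated objective: alternative
-- what changed: Replaced the single-pass stack with naive repeated scanning: find the leftmost removable adjacent pair, delete it, restart the scan until no pair remains.
import Mathlib
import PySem

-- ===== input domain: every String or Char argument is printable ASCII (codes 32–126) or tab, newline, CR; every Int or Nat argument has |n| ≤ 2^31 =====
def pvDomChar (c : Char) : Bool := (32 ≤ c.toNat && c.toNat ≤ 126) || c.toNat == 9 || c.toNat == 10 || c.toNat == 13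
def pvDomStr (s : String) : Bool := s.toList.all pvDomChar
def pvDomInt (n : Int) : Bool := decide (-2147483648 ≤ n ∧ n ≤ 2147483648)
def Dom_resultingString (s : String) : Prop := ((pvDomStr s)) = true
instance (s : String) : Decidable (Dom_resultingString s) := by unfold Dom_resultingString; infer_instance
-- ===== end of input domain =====

-- B replaces A's single-pass stack by repeated leftmost-pair removal with rescans (alternative algorithm, not faster).

-- abs(ord(a) - ord(b)) == 1 or abs(ord(a) - ord(b)) == 25
def pvMatch (a b : Char) : Bool :=
  ((a.toNat : Int) - (b.toNat : Int)).natAbs == 1 || ((a.toNat : Int) - (b.toNat : Int)).natAbs == 25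

-- ===== PORT A =====
-- the stack is kept TOP-FIRST (head = Python's stack[-1]); ''.join(stack) is therefore the reverse
def pvAStep (stack : List Char) (c : Char) : List Char :=
  match stack with
  | top :: rest => if pvMatch c top then rest else c :: top :: rest
  | [] => [c]

def resultingString (s : String) : String :=
  String.ofList ((s.toList.foldl pvAStep []).reverse)

-- ===== PORT B =====
-- scan for the leftmost adjacent matching pair; some l' = the list with that pair deleted
def pvFind : List Char → Option (List Char)
  | a :: b :: t => if pvMatch a b then some t else (pvFind (b :: t)).map (a :: ·)
  | _ => none

theorem pvFind_length : ∀ {l l' : List Char}, pvFind l = some l' → l'.length < l.length := by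
  intro l
  induction l with
  | nil => intro l' h; simp [pvFind] at h
  | cons a t ih =>
    intro l' h
    cases t with
    | nil => simp [pvFind] at h
    | cons b r =>
      simp only [pvFind] at h
      split at h
      · cases h; simp
      · cases hm : pvFind (b :: r) with
        | none => rw [hm] at h; simp at h
        | some m =>
          rw [hm] at h
          simp only [Option.map_some] at h
          cases h
          have := ih hm
          simpa using Nat.succ_lt_succ this

def pvBLoop (l : List Char) : List Char :=
  match hf : pvFind l with
  | some l' => pvBLoop l'
  | none => l
termination_by l.length
decreasing_by exact pvFind_length hf

def resultingString_alt (s : String) : String :=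
  String.ofList (pvBLoop s.toList)

-- ===== PRECONDITION & SPEC =====
def Spec_resultingString (s : String) (out : String) : Prop := out = resultingString_alt s
instance (s : String) (out : String) : Decidable (Spec_resultingString s out) := by unfold Spec_resultingString; infer_instance

-- ===== CLAIM (what is proved, stated in full; the proofs are below) =====
def Claim_equal_resultingString : Prop := ∀ (s : String), Dom_resultingString s → Spec_resultingString s (resultingString s)

-- ===== LEMMAS AND PROOFS =====

theorem pvMatch_symm (a b : Char) : pvMatch a b = pvMatch b a := by
  have h : ((a.toNat : Int) - b.toNat).natAbs = ((b.toNat : Int) - a.toNat).natAbs := by omega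
  simp [pvMatch, h]

-- "the head of l (if any) does not match the top of st (if any)"
def pvOk (l st : List Char) : Prop :=
  match l, st with
  | a :: _, b :: _ => pvMatch a b = false
  | _, _ => True

-- if no adjacent pair matches, the stack run just reverses the input onto the stack
theorem pvNF : ∀ (l st : List Char), pvFind l = none → pvOk l st →
    l.foldl pvAStep st = l.reverse ++ st := by
  intro l
  induction l with
  | nil => intro st _ _; simp
  | cons a t ih =>
    intro st hf hok
    have hstep : pvAStep st a = a :: st := by
      cases st with
      | nil => rfl
      | cons b r => simp [pvAStep, pvOk] at hok ⊢; simp [hok]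
    have ht : pvFind t = none ∧ pvOk t (a :: st) := by
      cases t with
      | nil => exact ⟨rfl, trivial⟩
      | cons b r =>
        simp only [pvFind] at hf
        split at hf
        · simp at hf
        · next hm =>
          constructor
          · cases hfr : pvFind (b :: r) with
            | none => rfl
            | some m => rw [hfr] at hf; simp at hf
          · simp only [pvOk]
            rw [pvMatch_symm]
            simpa using hm
    calc (a :: t).foldl pvAStep st = t.foldl pvAStep (a :: st) := by
            simp [List.foldl_cons, hstep]
      _ = t.reverse ++ (a :: st) := ih (a :: st) ht.1 ht.2
      _ = (a :: t).reverse ++ st := by simp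

-- removing the leftmost matching pair does not change the stack run
theorem pvStep : ∀ (l : List Char) (l' st : List Char), pvFind l = some l' → pvOk l st →
    l.foldl pvAStep st = l'.foldl pvAStep st := by
  intro l
  induction l with
  | nil => intro l' st h _; simp [pvFind] at h
  | cons a t ih =>
    intro l' st h hok
    cases t with
    | nil => simp [pvFind] at h
    | cons b r =>
      have hstep : pvAStep st a = a :: st := by
        cases st with
        | nil => rfl
        | cons c w => simp [pvAStep, pvOk] at hok ⊢; simp [hok]
      simp only [pvFind] at h
      split at h
      · next hm =>
        cases h
        have hba : pvMatch b a = true := by rw [pvMatch_symm]; exact hm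
        rw [List.foldl_cons, hstep, List.foldl_cons]
        simp [pvAStep, hba]
      · next hm =>
        cases hfr : pvFind (b :: r) with
        | none => rw [hfr] at h; simp at h
        | some m =>
          rw [hfr] at h
          simp only [Option.map_some] at h
          cases h
          have hok' : pvOk (b :: r) (a :: st) := by
            simp only [pvOk]; rw [pvMatch_symm]; simpa using hm
          calc (a :: b :: r).foldl pvAStep st = (b :: r).foldl pvAStep (a :: st) := by
                  simp [List.foldl_cons, hstep]
            _ = m.foldl pvAStep (a :: st) := ih m (a :: st) hfr hok'
            _ = (a :: m).foldl pvAStep st := by simp [List.foldl_cons, hstep]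

theorem pvKey (l : List Char) : l.foldl pvAStep [] = (pvBLoop l).reverse := by
  rw [pvBLoop]
  cases h : pvFind l with
  | some l' =>
    have hok : pvOk l [] := by cases l <;> trivial
    rw [pvStep l l' [] h hok]
    exact pvKey l'
  | none =>
    have hok : pvOk l [] := by cases l <;> trivial
    simpa using pvNF l [] h hok
termination_by l.length
decreasing_by exact pvFind_length h

-- ===== VERDICT (by name: the statement is the Claim_ definition above) =====
theorem resultingString_spec : Claim_equal_resultingString := by
  intro s _
  unfold Spec_resultingString resultingString resultingString_alt
  rw [pvKey, List.reverse_reverse]
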